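-- pv_equiv track=rewrite | github.com/choizlor/Algorithm | Softeer/성적 평가.py | solve
-- ===== SOURCE A (Python) =====
-- def solve(tmp):
--     dic = {}
--     answer = []
--     stmp = sorted(tmp, reverse=True)
--     for idx, t in enumerate(stmp):
--         if t not in dic:
--             dic[t] = idx + 1
--     for t in tmp:
--         answer.append(dic[t])
--     return answer
-- ===== SOURCE B (Python) =====
-- def solve(tmp):
--     return [1 + sum(1 for x in tmp if x > t) for t in tmp]
-- ===== Notes on version B (the rewrite author's own statement) =====
-- stated objective: simpler
-- what changed: Replaced the sort-descending + first-occurrence-dict + lookup pipeline by a one-line direct computation: each element's competition rank is 1 plus the number of strictly greater elements.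
import Mathlib
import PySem

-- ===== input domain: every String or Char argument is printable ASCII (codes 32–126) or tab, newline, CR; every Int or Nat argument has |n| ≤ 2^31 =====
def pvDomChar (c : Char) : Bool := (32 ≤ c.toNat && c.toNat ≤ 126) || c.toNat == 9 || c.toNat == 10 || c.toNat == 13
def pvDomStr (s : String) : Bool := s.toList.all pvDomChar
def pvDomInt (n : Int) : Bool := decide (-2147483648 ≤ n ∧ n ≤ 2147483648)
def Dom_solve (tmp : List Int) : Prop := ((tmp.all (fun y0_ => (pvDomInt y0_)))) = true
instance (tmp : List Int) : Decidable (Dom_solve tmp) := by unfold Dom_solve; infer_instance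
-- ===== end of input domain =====

-- B computes each competition rank directly as 1 + (number of strictly greater elements),
-- replacing A's sort + first-occurrence dict; objective: simpler.


-- ===== PORT A =====
def solve (tmp : List Int) : List Int :=
  let stmp := PySem.List.sorted tmp (fun x => x) true
  let dic := (PySem.List.enumerate stmp 0).foldl
    (fun d p => if d.contains p.2 then d else d.insert p.2 (p.1 + 1)) PySem.Dict.empty
  -- dic[t]: the key is always present (t ∈ tmp and every element of tmp is a key of dic),
  -- so the getD default 0 is never used and the lookup is exact
  tmp.foldl (fun answer t => answer ++ [dic.getD t 0]) []

-- ===== PORT B =====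
def solve_alt (tmp : List Int) : List Int :=
  tmp.map (fun t => 1 + ((tmp.countP (fun x => decide (t < x)) : Nat) : Int))

-- ===== PRECONDITION & SPEC =====
def Spec_solve (tmp : List Int) (out : List Int) : Prop := out = solve_alt tmp
instance (tmp : List Int) (out : List Int) : Decidable (Spec_solve tmp out) := by unfold Spec_solve; infer_instance

-- ===== CLAIM (what is proved, stated in full; the proofs are below) =====
def Claim_equal_solve : Prop := ∀ (tmp : List Int), Dom_solve tmp → Spec_solve tmp (solve tmp)

-- ===== LEMMAS AND PROOFS =====

-- the dict-building loop: lookup afterwards = first-occurrence index (+1, offset by s)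
lemma buildD (l : List Int) (s : Int) (d : PySem.Dict Int Int) (t : Int) :
    ((PySem.List.enumerate l s).foldl
      (fun d p => if d.contains p.2 then d else d.insert p.2 (p.1 + 1)) d).getD t 0
    = if d.contains t then d.getD t 0
      else if t ∈ l then s + (l.idxOf t : Int) + 1 else 0 := by
  induction l generalizing s d with
  | nil =>
    rw [PySem.List.enumerate_nil, List.foldl_nil]
    by_cases ht : d.contains t = true
    · rw [if_pos ht]
    · rw [if_neg ht, if_neg (List.not_mem_nil)]
      exact PySem.Dict.getD_of_not_contains d 0 (by simpa using ht)
  | cons h l ih =>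
    rw [PySem.List.enumerate_cons, List.foldl_cons]
    by_cases hc : d.contains h = true
    · rw [if_pos hc, ih]
      by_cases ht : d.contains t = true
      · rw [if_pos ht, if_pos ht]
      · rw [if_neg ht, if_neg ht]
        have hth : t ≠ h := fun e => ht (e ▸ hc)
        by_cases hm : t ∈ l
        · rw [if_pos hm, if_pos (List.mem_cons_of_mem h hm), List.idxOf_cons]
          rw [beq_eq_false_iff_ne.mpr (Ne.symm hth)]
          simp only [cond_false]
          push_cast
          ring
        · rw [if_neg hm, if_neg (by simp [hth, hm])]
    · rw [if_neg hc, ih, PySem.Dict.contains_insert, PySem.Dict.getD_insert]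
      by_cases hth : t = h
      · subst hth
        rw [beq_self_eq_true t]
        simp only [Bool.true_or, if_true]
        rw [if_neg hc, if_pos (List.mem_cons_self), List.idxOf_cons, beq_self_eq_true t]
        simp only [cond_true]
        push_cast
        ring
      · rw [beq_eq_false_iff_ne.mpr hth]
        simp only [Bool.false_or]
        by_cases ht : d.contains t = true
        · rw [if_pos ht, if_neg hth, if_pos ht]
        · rw [if_neg ht, if_neg ht]
          by_cases hm : t ∈ l
          · rw [if_pos hm, if_pos (List.mem_cons_of_mem h hm), List.idxOf_cons]
            rw [beq_eq_false_iff_ne.mpr (Ne.symm hth)]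
            simp only [cond_false]
            push_cast
            ring
          · rw [if_neg hm, if_neg (by simp [hth, hm])]

-- in a descending-sorted list, the first-occurrence index of a member
-- is the number of strictly greater elements
lemma idxOf_desc (l : List Int) (t : Int)
    (hp : l.Pairwise (fun a b => b ≤ a)) (hm : t ∈ l) :
    l.idxOf t = l.countP (fun x => decide (t < x)) := by
  induction l with
  | nil => cases hm
  | cons h l ih =>
    rcases List.pairwise_cons.mp hp with ⟨hle, hp'⟩
    by_cases hth : t = h
    · subst hth
      have : l.countP (fun x => decide (t < x)) = 0 := by
        rw [List.countP_eq_zero]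
        intro x hx
        simp only [decide_eq_true_eq, not_lt]
        exact hle x hx
      simp [this]
    · have hm' : t ∈ l := by
        rcases List.mem_cons.mp hm with h1 | h1
        · exact absurd h1 hth
        · exact h1
      have hlt : t < h := lt_of_le_of_ne (hle t hm') hth
      have hbeq : (h == t) = false := by simp [Ne.symm hth]
      simp [List.idxOf_cons, hbeq, hlt, ih hp' hm']

-- the answer-accumulating loop is a map
lemma foldl_append_map (l : List Int) (f : Int → Int) (acc : List Int) :
    l.foldl (fun answer t => answer ++ [f t]) acc = acc ++ l.map f := by
  induction l generalizing acc with
  | nil => simp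
  | cons h l ih => simp [ih]

-- ===== VERDICT (by name: the statement is the Claim_ definition above) =====
theorem solve_spec : Claim_equal_solve := by
  intro tmp _
  unfold Spec_solve solve solve_alt
  simp only
  rw [foldl_append_map]
  simp only [List.nil_append]
  apply List.map_congr_left
  intro t ht
  have hperm := PySem.List.sorted_perm tmp (fun x => x) true
  have hmem : t ∈ PySem.List.sorted tmp (fun x => x) true :=
    (PySem.List.mem_sorted _ _ _ _).mpr ht
  rw [buildD]
  simp only [PySem.Dict.contains_empty, if_false, hmem, if_true, Bool.false_eq_true]
  rw [idxOf_desc _ _ (PySem.List.sorted_pairwise_rev tmp (fun x => x)) hmem]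
  rw [hperm.countP_eq]
  ring
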